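-- pv_equiv track=rewrite | github.com/wasdw1012/RSA-LLL-2.0 | categorical_engine.py | _enumerate_paths
-- ===== SOURCE A (Python) =====
-- from typing import (
--     Optional, Tuple, List, Dict, Any, Callable, Union,
--     Set, TypeVar, Generic, Iterator
-- )
--
-- def _enumerate_paths(
--
--     edges: List[Tuple[str, str]],
--     entry: str,
--     max_depth: Optional[int] = None
-- ) -> List[str]:
--     """枚举从入口点开始的所有路径
--
--     数学约定：路径集合取 **所有从 entry 出发的极大简单路径**
--     （simple path = 不包含重复节点；极大 = 不能再延伸而不破坏简单性）。
--
--     该定义在存在环的 CFG 中仍然给出有限集合，因此不需要任何启发式深度截断。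
--
--     Args:
--         edges: CFG 边列表
--         entry: 入口点
--         max_depth: 可选的显式深度上界（仅用于上游强制资源约束；不作为默认策略）
--     """
--     # 构建邻接表（排序以保证确定性）
--     adj: Dict[str, List[str]] = {}
--     nodes: Set[str] = set()
--     for src, tgt in edges:
--         nodes.add(src)
--         nodes.add(tgt)
--         adj.setdefault(src, []).append(tgt)
--     for src in adj:
--         adj[src] = sorted(set(adj[src]))
--
--     if entry not in nodes:
--         return []
--
--     paths: List[str] = []
--
--     # 深度上界：简单路径最多访问 |V| 个节点
--     hard_cap = len(nodes) - 1
--     if max_depth is not None: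
--         hard_cap = min(hard_cap, int(max_depth))
--
--     def dfs(node: str, path: List[str], visited: Set[str]) -> None:
--         # 如果达到显式硬上界，则视为在资源约束下的极大路径
--         if len(path) - 1 >= hard_cap:
--             paths.append("→".join(path))
--             return
--
--         nexts = [n for n in adj.get(node, []) if n not in visited]
--         if not nexts:
--             paths.append("→".join(path))
--             return
--
--         for nxt in nexts:
--             dfs(nxt, path + [nxt], visited | {nxt})
--
--     dfs(entry, [entry], {entry})
--     return paths
-- ===== SOURCE B (Python) =====
-- from typing import Optional, Tuple, List, Dict, Set
--
-- def _enumerate_paths(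
--     edges: List[Tuple[str, str]],
--     entry: str,
--     max_depth: Optional[int] = None
-- ) -> List[str]:
--     # B: instead of threading a growing path and appending joined strings at each
--     # leaf, a pure recursion returns the list of maximal simple path *suffixes*
--     # (as node lists) under a countdown budget; the paths are assembled and
--     # joined once, in a single comprehension at the end.
--     adj: Dict[str, List[str]] = {}
--     nodes: Set[str] = set()
--     for src, tgt in edges:
--         nodes.add(src)
--         nodes.add(tgt)
--         adj.setdefault(src, []).append(tgt)
--     for src in adj:
--         adj[src] = sorted(set(adj[src]))
--
--     if entry not in nodes:
--         return []
--
--     cap = len(nodes) - 1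
--     if max_depth is not None:
--         cap = min(cap, int(max_depth))
--
--     def ext(node: str, visited: Set[str], k: int) -> List[List[str]]:
--         if k <= 0:
--             return [[]]
--         ns = [n for n in adj.get(node, []) if n not in visited]
--         if not ns:
--             return [[]]
--         return [[n] + rest for n in ns for rest in ext(n, visited | {n}, k - 1)]
--
--     return ["→".join([entry] + t) for t in ext(entry, {entry}, cap)]
-- ===== Notes on version B (the rewrite author's own statement) =====
-- stated objective: alternative
-- what changed: A threads the growing path through a dfs that joins and appends a string at every leaf; B is a pure recursion returning the list of maximal simple path suffixes (node lists) under a countdown budget, composed by flatMap/map comprehensions, with the paths assembled and joined once in a single pass at the end.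
import Mathlib
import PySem

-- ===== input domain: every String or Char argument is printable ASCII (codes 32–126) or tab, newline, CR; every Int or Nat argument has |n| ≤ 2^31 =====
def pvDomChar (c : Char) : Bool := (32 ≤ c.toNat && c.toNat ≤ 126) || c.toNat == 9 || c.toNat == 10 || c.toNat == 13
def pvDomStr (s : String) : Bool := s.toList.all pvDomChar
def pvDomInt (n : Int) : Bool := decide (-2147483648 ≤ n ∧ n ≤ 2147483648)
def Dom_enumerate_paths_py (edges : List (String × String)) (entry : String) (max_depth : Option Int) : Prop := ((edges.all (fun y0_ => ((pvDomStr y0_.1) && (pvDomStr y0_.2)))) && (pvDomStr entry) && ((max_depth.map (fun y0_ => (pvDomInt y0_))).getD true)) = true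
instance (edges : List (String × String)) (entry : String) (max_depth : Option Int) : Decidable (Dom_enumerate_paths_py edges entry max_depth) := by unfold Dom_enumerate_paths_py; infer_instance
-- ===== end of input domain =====

-- B replaces A's path-threading dfs (mutable output, join at every leaf) by a pure
-- recursion returning maximal path SUFFIXES under a countdown budget, assembled and
-- joined once at the end (objective: alternative decomposition, same cost).

-- ===== PORT A =====
-- shared prelude of both Pythons: one pass building (nodes, adj), then
-- adj[src] = sorted(set(adj[src])) for every key, in insertion order
def pvNodesAdj (edges : List (String × String)) : PySem.Set String × PySem.Dict String (List String) :=
  let st := edges.foldl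
    (fun (st : PySem.Set String × PySem.Dict String (List String)) e =>
      (PySem.Set.add (PySem.Set.add st.1 e.1) e.2,
       st.2.modify e.1 [] (fun l => l ++ [e.2])))
    (PySem.Set.empty, PySem.Dict.empty)
  (st.1, PySem.Dict.mk (st.2.items.map (fun p => (p.1, PySem.List.sorted (PySem.Set.ofList p.2) (fun x => x) false))))

-- shared prelude: hard_cap = len(nodes) - 1, capped by max_depth when given
def pvCap (nodes : PySem.Set String) (max_depth : Option Int) : Int :=
  match max_depth with
  | none => (PySem.Set.len nodes : Int) - 1
  | some d => min ((PySem.Set.len nodes : Int) - 1) d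

-- A's recursive dfs: threads the accumulated path, joins it at each leaf,
-- appends the children's results left to right (the for-loop as a foldl)
def dfsA (adj : PySem.Dict String (List String)) (cap : Int) (node : String)
    (path : List String) (visited : PySem.Set String) : List String :=
  if (path.length : Int) - 1 ≥ cap then [PySem.Str.join "→" path]
  else
    let nexts := (adj.getD node []).filter (fun n => !(PySem.Set.contains visited n))
    if nexts.isEmpty then [PySem.Str.join "→" path]
    else nexts.attach.foldl
      (fun acc x => acc ++ dfsA adj cap x.1 (path ++ [x.1]) (PySem.Set.union visited [x.1])) []
termination_by (cap + 1 - path.length).toNat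
decreasing_by simp_all; omega

def enumerate_paths_py (edges : List (String × String)) (entry : String) (max_depth : Option Int) : List String :=
  let na := pvNodesAdj edges
  if !(PySem.Set.contains na.1 entry) then []
  else
    dfsA na.2 (pvCap na.1 max_depth) entry [entry] (PySem.Set.ofList [entry])

-- ===== PORT B =====
-- B's ext: list of maximal simple path suffixes from node under budget k
def extB (adj : PySem.Dict String (List String)) (node : String)
    (visited : PySem.Set String) (k : Int) : List (List String) :=
  if k ≤ 0 then [[]]
  else
    let ns := (adj.getD node []).filter (fun n => !(PySem.Set.contains visited n))
    if ns.isEmpty then [[]]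
    else ns.attach.flatMap
      (fun n => (extB adj n.1 (PySem.Set.union visited [n.1]) (k - 1)).map (fun rest => n.1 :: rest))
termination_by k.toNat
decreasing_by omega

def enumerate_paths_py_alt (edges : List (String × String)) (entry : String) (max_depth : Option Int) : List String :=
  let na := pvNodesAdj edges
  if !(PySem.Set.contains na.1 entry) then []
  else
    (extB na.2 entry (PySem.Set.ofList [entry]) (pvCap na.1 max_depth)).map
      (fun t => PySem.Str.join "→" (entry :: t))

-- ===== PRECONDITION & SPEC =====
def Spec_enumerate_paths_py (edges : List (String × String)) (entry : String) (max_depth : Option Int) (out : List String) : Prop := out = enumerate_paths_py_alt edges entry max_depth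
instance (edges : List (String × String)) (entry : String) (max_depth : Option Int) (out : List String) : Decidable (Spec_enumerate_paths_py edges entry max_depth out) := by unfold Spec_enumerate_paths_py; infer_instance

-- ===== CLAIM (what is proved, stated in full; the proofs are below) =====
def Claim_equal_enumerate_paths_py : Prop := ∀ (edges : List (String × String)) (entry : String) (max_depth : Option Int), Dom_enumerate_paths_py edges entry max_depth → Spec_enumerate_paths_py edges entry max_depth (enumerate_paths_py edges entry max_depth)

-- ===== LEMMAS AND PROOFS =====

lemma dfsA_eq_extB (adj : PySem.Dict String (List String)) (cap : Int) :
    ∀ (N : Nat) (node : String) (path : List String) (visited : PySem.Set String),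
      (cap + 1 - path.length).toNat ≤ N →
      dfsA adj cap node path visited =
        (extB adj node visited (cap - ((path.length : Int) - 1))).map
          (fun t => PySem.Str.join "→" (path ++ t)) := by
  intro N
  induction N with
  | zero =>
    intro node path visited hN
    have hleaf : (path.length : Int) - 1 ≥ cap := by omega
    have hk : cap - ((path.length : Int) - 1) ≤ 0 := by omega
    rw [dfsA, extB]
    simp [hleaf, hk]
  | succ N ih =>
    intro node path visited hN
    by_cases hleaf : (path.length : Int) - 1 ≥ cap
    · have hk : cap - ((path.length : Int) - 1) ≤ 0 := by omega
      rw [dfsA, extB]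
      simp [hleaf, hk]
    · have hk : ¬ (cap - ((path.length : Int) - 1) ≤ 0) := by omega
      rw [dfsA, extB]
      simp only [hleaf, hk, if_false]
      by_cases hns : ((adj.getD node []).filter (fun n => !(PySem.Set.contains visited n))).isEmpty
      · rw [List.isEmpty_iff] at hns
        rw [hns]
        simp
      · have key : ∀ x : {x // x ∈ (adj.getD node []).filter (fun n => !(PySem.Set.contains visited n))},
            dfsA adj cap x.1 (path ++ [x.1]) (PySem.Set.union visited [x.1]) =
              (extB adj x.1 (PySem.Set.union visited [x.1]) (cap - ((path.length : Int) - 1) - 1)).map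
                (fun t => PySem.Str.join "→" (path ++ x.1 :: t)) := by
          intro x
          have hmeas : (cap + 1 - ((path ++ [x.1]).length : Int)).toNat ≤ N := by
            simp only [List.length_append, List.length_cons, List.length_nil]
            omega
          have harg : cap - (((path ++ [x.1]).length : Int) - 1) = cap - ((path.length : Int) - 1) - 1 := by
            simp only [List.length_append, List.length_cons, List.length_nil]
            push_cast
            ring
          rw [ih x.1 (path ++ [x.1]) (PySem.Set.union visited [x.1]) hmeas, harg]
          simp [List.append_assoc]
        rw [Bool.not_eq_true] at hns
        simp only [hns, Bool.false_eq_true, if_false, key]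
        rw [List.foldl_attach (f := fun acc n => acc ++ List.map
            (fun t => PySem.Str.join "→" (path ++ n :: t))
            (extB adj n (PySem.Set.union visited [n]) (cap - ((path.length : Int) - 1) - 1)))]
        rw [PySem.List.foldl_append_eq_flatMap]
        simp [List.flatMap, Function.comp_def, List.map_map]

-- ===== VERDICT (by name: the statement is the Claim_ definition above) =====
theorem enumerate_paths_py_spec : Claim_equal_enumerate_paths_py := by
  intro edges entry max_depth _
  unfold Spec_enumerate_paths_py enumerate_paths_py enumerate_paths_py_alt
  by_cases h : entry ∈ (pvNodesAdj edges).1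
  · simp only [PySem.Set.contains_eq_listContains, List.contains_eq_mem, h, decide_true,
      Bool.not_true, Bool.false_eq_true, if_false]
    rw [dfsA_eq_extB (pvNodesAdj edges).2 (pvCap (pvNodesAdj edges).1 max_depth)
      (pvCap (pvNodesAdj edges).1 max_depth + 1 - (([entry] : List String).length : Int)).toNat
      entry [entry] (PySem.Set.ofList [entry]) (le_refl _)]
    norm_num
  · simp [h]
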